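-- pv_equiv track=rewrite | github.com/sp9028/P1 | Rešitve starih izpitov/2.8.py | sopomena
-- ===== SOURCE A (Python) =====
-- def sopomena(stavek1, stavek2, sopomenke):
--     stavek1,stavek2 = stavek1.split(), stavek2.split()
--     if len(stavek1) != len(stavek2):
--         return False
--     for beseda1, beseda2 in zip(stavek1,stavek2):
--         if beseda1 != beseda2:
--             for so in sopomenke:
--                 if beseda1 in so and beseda2 in so:
--                     break
--             else:
--                 return False
--     return True
-- ===== SOURCE B (Python) =====
-- def sopomena(stavek1, stavek2, sopomenke):
--     w1, w2 = stavek1.split(), stavek2.split()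
--     if len(w1) != len(w2):
--         return False
--     groups = {}
--     for i, so in enumerate(sopomenke):
--         for w in so:
--             groups.setdefault(w, set()).add(i)
--     empty = set()
--     return all(a == b or not groups.get(a, empty).isdisjoint(groups.get(b, empty))
--                for a, b in zip(w1, w2))
-- ===== Notes on version B (the rewrite author's own statement) =====
-- stated objective: alternative
-- what changed: B precomputes a dict word->set of synonym-group indices once and tests each word pair by set intersection (isdisjoint), instead of A's rescan of every synonym group for every differing word pair; B trades A's lazy per-pair scans for an upfront index, which wins only when many pairs differ.
import Mathlib
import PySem

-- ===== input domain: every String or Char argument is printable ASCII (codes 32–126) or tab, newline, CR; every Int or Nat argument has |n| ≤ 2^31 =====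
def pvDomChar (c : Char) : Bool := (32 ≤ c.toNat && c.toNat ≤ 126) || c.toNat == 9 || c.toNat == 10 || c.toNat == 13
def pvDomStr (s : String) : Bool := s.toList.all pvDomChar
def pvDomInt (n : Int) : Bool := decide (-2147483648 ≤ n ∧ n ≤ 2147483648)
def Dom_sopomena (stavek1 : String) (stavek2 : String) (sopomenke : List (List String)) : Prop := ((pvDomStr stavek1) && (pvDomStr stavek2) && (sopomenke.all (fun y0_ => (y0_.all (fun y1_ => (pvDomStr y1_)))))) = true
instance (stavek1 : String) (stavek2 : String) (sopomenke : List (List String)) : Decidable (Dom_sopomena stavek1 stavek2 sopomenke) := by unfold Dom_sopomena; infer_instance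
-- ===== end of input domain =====

-- B replaces A's per-pair rescan of all synonym groups by a dict word -> set of group
-- indices built once, testing each pair by set intersection (objective: alternative).

-- ===== PORT A =====
-- inner 'for so in sopomenke: if beseda1 in so and beseda2 in so: break / else: return False'
def sopomenaInner (b1 b2 : String) : List (List String) → Bool
  | [] => false
  | so :: rest => if so.contains b1 && so.contains b2 then true else sopomenaInner b1 b2 rest

-- outer 'for beseda1, beseda2 in zip(stavek1, stavek2)'
def sopomenaLoop (sopomenke : List (List String)) : List (String × String) → Bool
  | [] => true
  | (b1, b2) :: rest =>
      if b1 ≠ b2 then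
        if sopomenaInner b1 b2 sopomenke then sopomenaLoop sopomenke rest else false
      else sopomenaLoop sopomenke rest

def sopomena (stavek1 : String) (stavek2 : String) (sopomenke : List (List String)) : Bool :=
  let w1 := PySem.Str.split₀ stavek1
  let w2 := PySem.Str.split₀ stavek2
  if w1.length ≠ w2.length then false
  else sopomenaLoop sopomenke (w1.zip w2)

-- ===== PORT B =====
-- 'for i, so in enumerate(sopomenke): for w in so: groups.setdefault(w, set()).add(i)'
def sopomenaGroups (sopomenke : List (List String)) : PySem.Dict String (PySem.Set Int) :=
  (PySem.List.enumerate sopomenke).foldl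
    (fun d p => p.2.foldl (fun d w => d.modify w PySem.Set.empty (fun s => PySem.Set.add s p.1)) d)
    PySem.Dict.empty

def sopomena_alt (stavek1 : String) (stavek2 : String) (sopomenke : List (List String)) : Bool :=
  let w1 := PySem.Str.split₀ stavek1
  let w2 := PySem.Str.split₀ stavek2
  if w1.length ≠ w2.length then false
  else
    let groups := sopomenaGroups sopomenke
    (w1.zip w2).all (fun p =>
      p.1 == p.2 ||
        !(PySem.Set.isdisjoint (groups.getD p.1 PySem.Set.empty) (groups.getD p.2 PySem.Set.empty)))

-- ===== PRECONDITION & SPEC =====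
def Spec_sopomena (stavek1 : String) (stavek2 : String) (sopomenke : List (List String)) (out : Bool) : Prop := out = sopomena_alt stavek1 stavek2 sopomenke
instance (stavek1 : String) (stavek2 : String) (sopomenke : List (List String)) (out : Bool) : Decidable (Spec_sopomena stavek1 stavek2 sopomenke out) := by unfold Spec_sopomena; infer_instance

-- ===== CLAIM (what is proved, stated in full; the proofs are below) =====
def Claim_equal_sopomena : Prop := ∀ (stavek1 : String) (stavek2 : String) (sopomenke : List (List String)), Dom_sopomena stavek1 stavek2 sopomenke → Spec_sopomena stavek1 stavek2 sopomenke (sopomena stavek1 stavek2 sopomenke)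

-- ===== LEMMAS AND PROOFS =====

theorem mem_inner_fold (ws : List String) (d : PySem.Dict String (PySem.Set Int))
    (j x : Int) (v : String) :
    x ∈ (ws.foldl (fun d w => d.modify w PySem.Set.empty (fun s => PySem.Set.add s j)) d).getD v PySem.Set.empty ↔
      x ∈ d.getD v PySem.Set.empty ∨ (x = j ∧ v ∈ ws) := by
  induction ws generalizing d with
  | nil => simp
  | cons w ws ih =>
      rw [List.foldl_cons, ih, PySem.Dict.getD_modify, List.mem_cons]
      by_cases h : v = w
      · subst h
        rw [if_pos rfl, PySem.Set.mem_add]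
        tauto
      · rw [if_neg h]
        constructor
        · rintro (hm | hm)
          · exact Or.inl hm
          · exact Or.inr ⟨hm.1, Or.inr hm.2⟩
        · rintro (hm | ⟨rfl, (rfl | hm)⟩)
          · exact Or.inl hm
          · exact absurd rfl h
          · exact Or.inr ⟨rfl, hm⟩

theorem mem_outer_fold (l : List (Int × List String)) (d : PySem.Dict String (PySem.Set Int))
    (x : Int) (v : String) :
    x ∈ (l.foldl (fun d p => p.2.foldl (fun d w => d.modify w PySem.Set.empty (fun s => PySem.Set.add s p.1)) d) d).getD v PySem.Set.empty ↔
      x ∈ d.getD v PySem.Set.empty ∨ ∃ p ∈ l, x = p.1 ∧ v ∈ p.2 := by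
  induction l generalizing d with
  | nil => simp
  | cons p l ih =>
      rw [List.foldl_cons, ih, mem_inner_fold]
      constructor
      · rintro ((h | h) | ⟨q, hq, h⟩)
        · exact Or.inl h
        · exact Or.inr ⟨p, List.mem_cons_self, h⟩
        · exact Or.inr ⟨q, List.mem_cons_of_mem _ hq, h⟩
      · rintro (h | ⟨q, hq, h⟩)
        · exact Or.inl (Or.inl h)
        · rcases List.mem_cons.mp hq with rfl | hq
          · exact Or.inl (Or.inr h)
          · exact Or.inr ⟨q, hq, h⟩

theorem mem_groups (sopomenke : List (List String)) (x : Int) (v : String) :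
    x ∈ (sopomenaGroups sopomenke).getD v PySem.Set.empty ↔
      ∃ k : Nat, ∃ h : k < sopomenke.length, x = (k : Int) ∧ v ∈ sopomenke[k] := by
  unfold sopomenaGroups
  rw [mem_outer_fold]
  constructor
  · rintro (h | ⟨p, hp, hx, hv⟩)
    · simp [PySem.Set.empty, PySem.Dict.getD_empty] at h
    · obtain ⟨k, hk, rfl⟩ := (PySem.List.mem_enumerate_iff sopomenke 0 p).mp hp
      exact ⟨k, hk, by simpa using hx, hv⟩
  · rintro ⟨k, hk, rfl, hv⟩
    refine Or.inr ⟨((k : Int), sopomenke[k]),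
      (PySem.List.mem_enumerate_iff sopomenke 0 _).mpr ⟨k, hk, by simp⟩, rfl, hv⟩

theorem inner_iff (b1 b2 : String) (sop : List (List String)) :
    sopomenaInner b1 b2 sop = true ↔ ∃ so ∈ sop, b1 ∈ so ∧ b2 ∈ so := by
  induction sop with
  | nil => simp [sopomenaInner]
  | cons so rest ih =>
      simp only [sopomenaInner]
      split_ifs with h
      · simp only [List.contains_eq_mem, Bool.and_eq_true, decide_eq_true_eq] at h
        simp only [true_iff, List.mem_cons]
        exact ⟨so, Or.inl rfl, h⟩
      · simp only [List.contains_eq_mem, Bool.and_eq_true, decide_eq_true_eq, not_and_or] at h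
        simp only [ih, List.mem_cons]
        constructor
        · rintro ⟨q, hq, hh⟩; exact ⟨q, Or.inr hq, hh⟩
        · rintro ⟨q, (rfl | hq), hh⟩
          · cases h with
            | inl h => exact absurd hh.1 h
            | inr h => exact absurd hh.2 h
          · exact ⟨q, hq, hh⟩

theorem pair_check_eq (b1 b2 : String) (sop : List (List String)) :
    (!(PySem.Set.isdisjoint ((sopomenaGroups sop).getD b1 PySem.Set.empty)
        ((sopomenaGroups sop).getD b2 PySem.Set.empty))) = sopomenaInner b1 b2 sop := by
  rcases hA : sopomenaInner b1 b2 sop with _ | _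
  · -- inner = false: no shared group, the two index sets are disjoint
    have hno : ¬ ∃ so ∈ sop, b1 ∈ so ∧ b2 ∈ so := by
      rw [← inner_iff]; simp [hA]
    have hd : PySem.Set.isdisjoint ((sopomenaGroups sop).getD b1 PySem.Set.empty)
        ((sopomenaGroups sop).getD b2 PySem.Set.empty) = true := by
      rw [PySem.Set.isdisjoint_iff]
      intro x hx1 hx2
      obtain ⟨k, hk, rfl, hv1⟩ := (mem_groups sop x b1).mp hx1
      obtain ⟨k', hk', he, hv2⟩ := (mem_groups sop _ b2).mp hx2
      have hkk : k = k' := by exact_mod_cast he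
      subst hkk
      exact hno ⟨sop[k], List.getElem_mem hk, hv1, hv2⟩
    rw [hd]; rfl
  · obtain ⟨so, hso, h1, h2⟩ := (inner_iff b1 b2 sop).mp hA
    obtain ⟨k, hk, rfl⟩ := List.getElem_of_mem hso
    have hd : PySem.Set.isdisjoint ((sopomenaGroups sop).getD b1 PySem.Set.empty)
        ((sopomenaGroups sop).getD b2 PySem.Set.empty) = false := by
      rcases hD : PySem.Set.isdisjoint ((sopomenaGroups sop).getD b1 PySem.Set.empty)
        ((sopomenaGroups sop).getD b2 PySem.Set.empty) with _ | _
      · rfl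
      · exact absurd ((mem_groups sop k b2).mpr ⟨k, hk, rfl, h2⟩)
          ((PySem.Set.isdisjoint_iff _ _).mp hD ((k : Int))
            ((mem_groups sop k b1).mpr ⟨k, hk, rfl, h1⟩))
    rw [hd]; rfl

theorem loop_eq_all (sop : List (List String)) (ps : List (String × String)) :
    sopomenaLoop sop ps = ps.all (fun p =>
      p.1 == p.2 ||
        !(PySem.Set.isdisjoint ((sopomenaGroups sop).getD p.1 PySem.Set.empty)
            ((sopomenaGroups sop).getD p.2 PySem.Set.empty))) := by
  induction ps with
  | nil => rfl
  | cons p ps ih =>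
      obtain ⟨b1, b2⟩ := p
      rw [List.all_cons]
      show sopomenaLoop sop ((b1, b2) :: ps) = _
      rw [sopomenaLoop, pair_check_eq]
      by_cases h : b1 = b2
      · subst h
        rw [if_neg (by simp), ih, beq_self_eq_true, Bool.true_or, Bool.true_and]
      · rw [if_pos h, beq_false_of_ne h, Bool.false_or]
        rcases hA : sopomenaInner b1 b2 sop with _ | _
        · rfl
        · rw [if_pos rfl, ih, Bool.true_and]

-- ===== VERDICT (by name: the statement is the Claim_ definition above) =====
theorem sopomena_spec : Claim_equal_sopomena := by
  intro s1 s2 sop _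
  unfold Spec_sopomena sopomena sopomena_alt
  by_cases h : (PySem.Str.split₀ s1).length ≠ (PySem.Str.split₀ s2).length
  · rw [if_pos h, if_pos h]
  · rw [if_neg h, if_neg h]
    exact loop_eq_all sop _
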